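/-
  THE END THEOREM OF giflib's DECODER, with every unit theorem plugged in: NO hypothesis is left.

      Gif.Final           the assembly `stays_in_code_of`: from the program's closed contracts and the stub's unit to `ProgX.StaysInCode Gif.image`
      Gif.Closed          `Gif.Closed.closed` (generated: tools/mkclosed.gif.sh): the bottom-up composition; it imports the proof of EVERY
                          unit of design/units.gif.tsv, Gif/Spec/Proved/<unit>.lean: the 155 leaf units as the farm's verdict accepted them
                          (tools/mk_final_copies.py; farm.gif/PROVED.tsv says which attempt), the 26 compositions (tools/mkcompositions.py)
      Gif.Spec.Proved.start   the accepted proof of the stub's unit `_start`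

  The same chain with the leaf units as hypotheses (the type-level check that contracts and cut assertions chain up) is
  Gif/FinalLeaves.lean (`Gif.gif_stays_in_code_of_leaves`). END/END-THEOREM.txt says what the statement unfolds to; END/END-AXIOMS.txt is
  the output of the `#print axioms` below; REBUILD.md says how to build this file from the archives.
-/
import Gif.Final
import Gif.Closed
import Gif.Spec.Proved.start
namespace Gif
open X86 X86.User Asan ProgX

/-- **giflib's decoder never trips the address sanitizer, and control never leaves its text window**: for every input of at most
1FF000H bytes, on every processor the proof covers, at ring 0 and at ring 3, the run of `X86.run` from the start machine of
c/gif/gif.bin (`DGifOpen` with a memory reader, `DGifSlurp`, the digest of everything slurped, `DGifCloseFile`) reaches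
`prog_exit`; after every step before that RIP is inside the text window and not at `__asan_report`. -/
theorem gif_stays_in_code : ProgX.StaysInCode Gif.image :=
  stays_in_code_of Closed.closed Spec.Proved.start_ok

/-- … hence it never reports. -/
theorem gif_never_reports : ProgX.NeverReports Gif.image :=
  gif_stays_in_code.neverReports

end Gif

#print axioms Gif.gif_stays_in_code
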